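-- pv_equiv track=rewrite | github.com/MochaS29/meal-plans-commerce | agents/meal-planning/ai_menu_generator.py | _categorize_ingredients
-- ===== SOURCE A (Python) =====
-- from typing import List, Dict, Optional, Tuple
--
-- def _categorize_ingredients(ingredients: List[Dict]) -> Dict:
--     """Categorize ingredients by grocery store section"""
--     categories = {
--         "Produce": [],
--         "Proteins": [],
--         "Dairy": [],
--         "Pantry": [],
--         "Frozen": []
--     }
--
--     for ingredient in ingredients:
--         item = ingredient.get("item", "")
--         # Simple categorization logic
--         if any(word in item.lower() for word in ["chicken", "beef", "fish", "salmon", "pork"]):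
--             categories["Proteins"].append(ingredient)
--         elif any(word in item.lower() for word in ["yogurt", "cheese", "milk", "egg"]):
--             categories["Dairy"].append(ingredient)
--         elif any(word in item.lower() for word in ["frozen"]):
--             categories["Frozen"].append(ingredient)
--         else:
--             categories["Produce"].append(ingredient)
--
--     return {k: v for k, v in categories.items() if v}
-- ===== SOURCE B (Python) =====
-- def _categorize_ingredients(ingredients):
--     """Categorize ingredients by grocery store section (per-category filter passes)."""
--     keyword_table = [
--         ("Proteins", ["chicken", "beef", "fish", "salmon", "pork"]),
--         ("Dairy", ["yogurt", "cheese", "milk", "egg"]),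
--         ("Frozen", ["frozen"]),
--     ]
--
--     def section(ingredient):
--         item = ingredient.get("item", "").lower()
--         for cat, words in keyword_table:
--             if any(w in item for w in words):
--                 return cat
--         return "Produce"
--
--     return {
--         cat: bucket
--         for cat in ["Produce", "Proteins", "Dairy", "Pantry", "Frozen"]
--         if (bucket := [ing for ing in ingredients if section(ing) == cat])
--     }
-- ===== Notes on version B (the rewrite author's own statement) =====
-- stated objective: idiomatic
-- what changed: Replaces the single pass that mutates five pre-built buckets via an if/elif keyword chain with a keyword-table-driven section() classifier and one filtering comprehension per category, building the result dict directly from the category order.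
import Mathlib
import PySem

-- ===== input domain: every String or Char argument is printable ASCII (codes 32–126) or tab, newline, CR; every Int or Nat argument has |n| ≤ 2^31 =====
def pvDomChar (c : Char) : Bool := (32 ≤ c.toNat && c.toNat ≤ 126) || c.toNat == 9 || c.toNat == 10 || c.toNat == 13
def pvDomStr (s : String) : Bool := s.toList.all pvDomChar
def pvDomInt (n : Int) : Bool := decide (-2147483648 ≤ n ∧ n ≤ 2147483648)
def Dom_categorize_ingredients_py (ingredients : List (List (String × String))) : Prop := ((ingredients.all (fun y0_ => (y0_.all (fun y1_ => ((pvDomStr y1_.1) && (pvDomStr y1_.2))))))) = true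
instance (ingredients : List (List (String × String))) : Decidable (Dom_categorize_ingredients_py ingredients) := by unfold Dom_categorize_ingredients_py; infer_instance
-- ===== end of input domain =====

-- B replaces A's one-pass bucket mutation behind an if/elif chain by a keyword-table
-- classifier and one filter pass per category (idiomatic; same asymptotic cost).

-- ===== PORT A =====
-- state (Produce, Proteins, Dairy, Pantry, Frozen) — the five fixed dict buckets
def categorize_ingredients_py (ingredients : List (List (String × String))) : List (String × List (List (String × String))) :=
  let cats := ingredients.foldl
    (fun (c : List (List (String × String)) × List (List (String × String)) × List (List (String × String)) × List (List (String × String)) × List (List (String × String))) ingredient =>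
      let item := (PySem.Dict.mk ingredient).getD "item" ""
      if (["chicken", "beef", "fish", "salmon", "pork"]).any (fun word => PySem.Str.isIn word (PySem.Str.lower item)) then
        (c.1, c.2.1 ++ [ingredient], c.2.2.1, c.2.2.2.1, c.2.2.2.2)
      else if (["yogurt", "cheese", "milk", "egg"]).any (fun word => PySem.Str.isIn word (PySem.Str.lower item)) then
        (c.1, c.2.1, c.2.2.1 ++ [ingredient], c.2.2.2.1, c.2.2.2.2)
      else if (["frozen"]).any (fun word => PySem.Str.isIn word (PySem.Str.lower item)) then
        (c.1, c.2.1, c.2.2.1, c.2.2.2.1, c.2.2.2.2 ++ [ingredient])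
      else
        (c.1 ++ [ingredient], c.2.1, c.2.2.1, c.2.2.2.1, c.2.2.2.2))
    ([], [], [], [], [])
  ([("Produce", cats.1), ("Proteins", cats.2.1), ("Dairy", cats.2.2.1), ("Pantry", cats.2.2.2.1), ("Frozen", cats.2.2.2.2)]).filter (fun kv => !kv.2.isEmpty)

-- ===== PORT B =====
def pvKeywordTable : List (String × List String) :=
  [("Proteins", ["chicken", "beef", "fish", "salmon", "pork"]),
   ("Dairy", ["yogurt", "cheese", "milk", "egg"]),
   ("Frozen", ["frozen"])]

def pvSection (ingredient : List (String × String)) : String :=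
  let item := PySem.Str.lower ((PySem.Dict.mk ingredient).getD "item" "")
  match pvKeywordTable.find? (fun cw => cw.2.any (fun w => PySem.Str.isIn w item)) with
  | some cw => cw.1
  | none => "Produce"

def categorize_ingredients_py_alt (ingredients : List (List (String × String))) : List (String × List (List (String × String))) :=
  ((["Produce", "Proteins", "Dairy", "Pantry", "Frozen"]).map
      (fun cat => (cat, ingredients.filter (fun ing => pvSection ing == cat)))).filter
    (fun kv => !kv.2.isEmpty)

-- ===== PRECONDITION & SPEC =====
def Spec_categorize_ingredients_py (ingredients : List (List (String × String))) (out : List (String × List (List (String × String)))) : Prop := out = categorize_ingredients_py_alt ingredients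
instance (ingredients : List (List (String × String))) (out : List (String × List (List (String × String)))) : Decidable (Spec_categorize_ingredients_py ingredients out) := by unfold Spec_categorize_ingredients_py; infer_instance

-- ===== CLAIM (what is proved, stated in full; the proofs are below) =====
def Claim_equal_categorize_ingredients_py : Prop := ∀ (ingredients : List (List (String × String))), Dom_categorize_ingredients_py ingredients → Spec_categorize_ingredients_py ingredients (categorize_ingredients_py ingredients)

-- ===== LEMMAS AND PROOFS =====

-- A's loop body, named for the invariant lemma
def pvStepA (c : List (List (String × String)) × List (List (String × String)) × List (List (String × String)) × List (List (String × String)) × List (List (String × String))) (ingredient : List (String × String)) :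
    List (List (String × String)) × List (List (String × String)) × List (List (String × String)) × List (List (String × String)) × List (List (String × String)) :=
  let item := (PySem.Dict.mk ingredient).getD "item" ""
  if (["chicken", "beef", "fish", "salmon", "pork"]).any (fun word => PySem.Str.isIn word (PySem.Str.lower item)) then
    (c.1, c.2.1 ++ [ingredient], c.2.2.1, c.2.2.2.1, c.2.2.2.2)
  else if (["yogurt", "cheese", "milk", "egg"]).any (fun word => PySem.Str.isIn word (PySem.Str.lower item)) then
    (c.1, c.2.1, c.2.2.1 ++ [ingredient], c.2.2.2.1, c.2.2.2.2)
  else if (["frozen"]).any (fun word => PySem.Str.isIn word (PySem.Str.lower item)) then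
    (c.1, c.2.1, c.2.2.1, c.2.2.2.1, c.2.2.2.2 ++ [ingredient])
  else
    (c.1 ++ [ingredient], c.2.1, c.2.2.1, c.2.2.2.1, c.2.2.2.2)

theorem pvFoldA_filter (l : List (List (String × String)))
    (a b c d e : List (List (String × String))) :
    l.foldl pvStepA (a, b, c, d, e) =
      (a ++ l.filter (fun ing => pvSection ing == "Produce"),
       b ++ l.filter (fun ing => pvSection ing == "Proteins"),
       c ++ l.filter (fun ing => pvSection ing == "Dairy"),
       d ++ l.filter (fun ing => pvSection ing == "Pantry"),
       e ++ l.filter (fun ing => pvSection ing == "Frozen")) := by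
  induction l generalizing a b c d e with
  | nil => simp
  | cons ing t ih =>
    by_cases h1 : (["chicken", "beef", "fish", "salmon", "pork"]).any
        (fun word => PySem.Str.isIn word (PySem.Str.lower ((PySem.Dict.mk ing).getD "item" ""))) = true
    · simp only [List.foldl_cons, pvStepA, h1, if_true]
      rw [ih]
      have hs : pvSection ing = "Proteins" := by
        simp only [pvSection, pvKeywordTable]
        rw [List.find?_cons_of_pos (by simpa using h1)]
      simp [hs]
    · by_cases h2 : (["yogurt", "cheese", "milk", "egg"]).any
          (fun word => PySem.Str.isIn word (PySem.Str.lower ((PySem.Dict.mk ing).getD "item" ""))) = true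
      · simp only [List.foldl_cons, pvStepA, h1, h2, if_true, if_false, Bool.false_eq_true]
        rw [ih]
        have hs : pvSection ing = "Dairy" := by
          simp only [pvSection, pvKeywordTable]
          rw [List.find?_cons_of_neg (by simpa using h1), List.find?_cons_of_pos (by simpa using h2)]
        simp [hs]
      · by_cases h3 : (["frozen"]).any
            (fun word => PySem.Str.isIn word (PySem.Str.lower ((PySem.Dict.mk ing).getD "item" ""))) = true
        · simp only [List.foldl_cons, pvStepA, h1, h2, h3, if_true, if_false, Bool.false_eq_true]
          rw [ih]
          have hs : pvSection ing = "Frozen" := by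
            simp only [pvSection, pvKeywordTable]
            rw [List.find?_cons_of_neg (by simpa using h1), List.find?_cons_of_neg (by simpa using h2),
              List.find?_cons_of_pos (by simpa using h3)]
          simp [hs]
        · simp only [List.foldl_cons, pvStepA, h1, h2, h3, if_false, Bool.false_eq_true]
          rw [ih]
          have hs : pvSection ing = "Produce" := by
            simp only [pvSection, pvKeywordTable]
            rw [List.find?_cons_of_neg (by simpa using h1), List.find?_cons_of_neg (by simpa using h2),
              List.find?_cons_of_neg (by simpa using h3), List.find?_nil]
          simp [hs]

-- ===== VERDICT (by name: the statement is the Claim_ definition above) =====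
theorem categorize_ingredients_py_spec : Claim_equal_categorize_ingredients_py := by
  intro ingredients _
  unfold Spec_categorize_ingredients_py
  show categorize_ingredients_py ingredients = categorize_ingredients_py_alt ingredients
  unfold categorize_ingredients_py categorize_ingredients_py_alt
  rw [show (fun (c : List (List (String × String)) × List (List (String × String)) × List (List (String × String)) × List (List (String × String)) × List (List (String × String))) ingredient =>
      let item := (PySem.Dict.mk ingredient).getD "item" ""
      if (["chicken", "beef", "fish", "salmon", "pork"]).any (fun word => PySem.Str.isIn word (PySem.Str.lower item)) then
        (c.1, c.2.1 ++ [ingredient], c.2.2.1, c.2.2.2.1, c.2.2.2.2)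
      else if (["yogurt", "cheese", "milk", "egg"]).any (fun word => PySem.Str.isIn word (PySem.Str.lower item)) then
        (c.1, c.2.1, c.2.2.1 ++ [ingredient], c.2.2.2.1, c.2.2.2.2)
      else if (["frozen"]).any (fun word => PySem.Str.isIn word (PySem.Str.lower item)) then
        (c.1, c.2.1, c.2.2.1, c.2.2.2.1, c.2.2.2.2 ++ [ingredient])
      else
        (c.1 ++ [ingredient], c.2.1, c.2.2.1, c.2.2.2.1, c.2.2.2.2)) = pvStepA from rfl]
  rw [pvFoldA_filter]
  simp [List.map]
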